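-- pv_equiv track=rewrite | github.com/demika765/Fall-2024 | dsonola_cs108_PA6_sec02.py | mystery_sum
-- ===== SOURCE A (Python) =====
-- def mystery_sum(number):
--     counter = 1
--     total = 0
--     while (counter < number):
--         if ((counter%2) == 0):
--             total += counter ** 2
--         elif ((counter%2) != 0):
--             total += counter * 2
--         counter += 1
--     return total
-- ===== SOURCE B (Python) =====
-- def mystery_sum(number):
--     m = number - 1
--     if m < 1:
--         return 0
--     e = m // 2          # count of even counters below number
--     o = (m + 1) // 2    # count of odd counters below number
--     return 4 * e * (e + 1) * (2 * e + 1) // 6 + 2 * o * o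
-- ===== Notes on version B (the rewrite author's own statement) =====
-- stated objective: faster
-- what changed: Replaced the counting while-loop by constant-time closed-form arithmetic-series formulas (square-pyramidal sum for the even squares, a perfect square for the doubled odds).
import Mathlib
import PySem

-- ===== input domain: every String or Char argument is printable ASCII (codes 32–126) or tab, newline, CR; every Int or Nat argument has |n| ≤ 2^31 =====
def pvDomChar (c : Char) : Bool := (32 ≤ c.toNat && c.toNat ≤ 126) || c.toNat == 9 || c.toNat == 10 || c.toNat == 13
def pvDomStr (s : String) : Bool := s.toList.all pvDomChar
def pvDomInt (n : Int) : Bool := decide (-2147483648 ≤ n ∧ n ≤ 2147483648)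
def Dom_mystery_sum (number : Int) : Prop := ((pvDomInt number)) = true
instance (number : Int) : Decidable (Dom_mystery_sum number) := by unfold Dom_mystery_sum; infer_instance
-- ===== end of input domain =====

-- B replaces A's O(n) counting loop by O(1) closed-form arithmetic-series formulas.


-- ===== PORT A =====
-- while (counter < number): fuel = (number - counter).toNat iterations remain
def mysteryGo : Nat → Int → Int → Int
  | 0, _, total => total
  | fuel + 1, counter, total =>
      mysteryGo fuel (counter + 1)
        (if counter % 2 = 0 then total + counter ^ 2 else total + counter * 2)

def mystery_sum (number : Int) : Int := mysteryGo (number - 1).toNat 1 0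

-- ===== PORT B =====
def mystery_sum_alt (number : Int) : Int :=
  let m := number - 1
  if m < 1 then 0
  else
    let e := PySem.Int.floordiv m 2
    let o := PySem.Int.floordiv (m + 1) 2
    PySem.Int.floordiv (4 * e * (e + 1) * (2 * e + 1)) 6 + 2 * o * o

-- ===== PRECONDITION & SPEC =====
def Spec_mystery_sum (number : Int) (out : Int) : Prop := out = mystery_sum_alt number
instance (number : Int) (out : Int) : Decidable (Spec_mystery_sum number out) := by unfold Spec_mystery_sum; infer_instance

-- ===== CLAIM (what is proved, stated in full; the proofs are below) =====
def Claim_equal_mystery_sum : Prop := ∀ (number : Int), Dom_mystery_sum number → Spec_mystery_sum number (mystery_sum number)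

-- ===== LEMMAS AND PROOFS =====

-- one loop-body term
def mysteryTerm (k : Int) : Int := if k % 2 = 0 then k ^ 2 else k * 2

-- sum of the first m terms (counter = 1 .. m)
def mysterySumNat : Nat → Int
  | 0 => 0
  | m + 1 => mysterySumNat m + mysteryTerm (m + 1)

-- square pyramidal numbers: T e = 1^2 + ... + e^2
def pyrT : Nat → Int
  | 0 => 0
  | e + 1 => pyrT e + ((e : Int) + 1) ^ 2

theorem pyrT_six (e : Nat) : 6 * pyrT e = (e : Int) * (e + 1) * (2 * e + 1) := by
  induction e with
  | zero => simp [pyrT]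
  | succ e ih =>
      simp only [pyrT]
      push_cast
      push_cast at ih
      ring_nf
      ring_nf at ih
      linarith

theorem mysteryGo_peel (fuel : Nat) :
    ∀ (c t : Int), mysteryGo (fuel + 1) c t = mysteryGo fuel c t + mysteryTerm (c + fuel) := by
  induction fuel with
  | zero => intro c t; simp [mysteryGo, mysteryTerm]; split_ifs <;> ring
  | succ fuel ih =>
      intro c t
      show mysteryGo (fuel + 1) (c + 1) _ = mysteryGo (fuel + 1) c t + _
      rw [ih]
      simp only [mysteryGo]
      have harg : (c + 1) + (fuel : Int) = c + ((fuel : Nat) + 1 : Nat) := by push_cast; ring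
      rw [harg]

theorem mysterySumNat_step (m : Nat) :
    mysterySumNat (m + 1) = mysterySumNat m + mysteryTerm ((m : Int) + 1) := by
  show mysterySumNat m + mysteryTerm ((m + 1 : Nat) : Int) = _
  congr 2

theorem mysteryGo_eq_sum (fuel : Nat) : mysteryGo fuel 1 0 = mysterySumNat fuel := by
  induction fuel with
  | zero => rfl
  | succ fuel ih =>
      rw [mysteryGo_peel, ih, mysterySumNat_step]
      congr 2; omega

-- closed form of the partial sums
theorem mysterySumNat_closed (m : Nat) :
    mysterySumNat m = 4 * pyrT (m / 2) + 2 * (((m + 1) / 2 : Nat) : Int) ^ 2 := by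
  induction m with
  | zero => simp [mysterySumNat, pyrT]
  | succ m ih =>
      rw [mysterySumNat_step, ih]
      rcases Nat.even_or_odd m with ⟨a, ha⟩ | ⟨a, ha⟩
      · -- m = 2a, m+1 odd
        subst ha
        have h1 : (a + a) / 2 = a := by omega
        have h2 : (a + a + 1) / 2 = a := by omega
        have h3 : (a + a + 1 + 1) / 2 = a + 1 := by omega
        rw [h1, h2, h3]
        unfold mysteryTerm
        rw [if_neg (by omega : ¬ (((a + a : Nat) : Int) + 1) % 2 = 0)]
        push_cast
        ring
      · -- m = 2a+1, m+1 even
        subst ha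
        have h1 : (2 * a + 1) / 2 = a := by omega
        have h2 : (2 * a + 1 + 1) / 2 = a + 1 := by omega
        have h3 : (2 * a + 1 + 1 + 1) / 2 = a + 1 := by omega
        rw [h1, h2, h3]
        unfold mysteryTerm
        rw [if_pos (by push_cast; omega : (((2 * a + 1 : Nat) : Int) + 1) % 2 = 0)]
        simp only [pyrT]
        push_cast
        ring

theorem floordiv_six_exact (x : Int) : PySem.Int.floordiv (6 * x) 6 = x := by
  rw [PySem.Int.floordiv_eq_ediv_of_pos (by omega)]
  omega

-- ===== VERDICT (by name: the statement is the Claim_ definition above) =====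
theorem mystery_sum_spec : Claim_equal_mystery_sum := by
  intro number _
  unfold Spec_mystery_sum mystery_sum mystery_sum_alt
  by_cases h : number - 1 < 1
  · -- loop never runs
    have : (number - 1).toNat = 0 := by omega
    simp [this, mysteryGo, h]
  · rw [if_neg h]
    set m : Nat := (number - 1).toNat with hm
    have hmi : number - 1 = (m : Int) := by omega
    rw [mysteryGo_eq_sum, mysterySumNat_closed]
    have he : PySem.Int.floordiv (number - 1) 2 = ((m / 2 : Nat) : Int) := by
      rw [hmi]; exact_mod_cast PySem.Int.floordiv_natCast m 2
    have ho : PySem.Int.floordiv (number - 1 + 1) 2 = (((m + 1) / 2 : Nat) : Int) := by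
      rw [hmi]
      have := PySem.Int.floordiv_natCast (m + 1) 2
      push_cast at this ⊢
      exact this
    rw [he, ho]
    congr 1
    · have key : 4 * ((m / 2 : Nat) : Int) * (((m / 2 : Nat) : Int) + 1) * (2 * ((m / 2 : Nat) : Int) + 1)
          = 6 * (4 * pyrT (m / 2)) := by
        have := pyrT_six (m / 2)
        linarith [this]
      rw [key, floordiv_six_exact]
    · ring
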